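-- pv_equiv track=rewrite | github.com/rubencart/transformers-struct-guidance | src/f1.py | get_between_brackets
-- ===== SOURCE A (Python) =====
-- def get_between_brackets(line, start_idx):
--     output = []
--     for char in line[(start_idx + 1):]:
--         if char == ')':
--             break
--         assert not(char == '(')
--         output.append(char)
--     return ''.join(output)
-- ===== SOURCE B (Python) =====
-- def get_between_brackets(line, start_idx):
--     sub = line[start_idx + 1:]
--     end = sub.find(')')
--     result = sub if end == -1 else sub[:end]
--     assert '(' not in result
--     return result
-- ===== Notes on version B (the rewrite author's own statement) =====
-- stated objective: simpler
-- what changed: Replaces the char-by-char accumulate-until-')' loop with a locate-then-slice decomposition: find the first ')' once (str.find) and slice the prefix, with the '(' check done by one membership test on that prefix; the C-level find/slice give a constant-factor speedup.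
import Mathlib
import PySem

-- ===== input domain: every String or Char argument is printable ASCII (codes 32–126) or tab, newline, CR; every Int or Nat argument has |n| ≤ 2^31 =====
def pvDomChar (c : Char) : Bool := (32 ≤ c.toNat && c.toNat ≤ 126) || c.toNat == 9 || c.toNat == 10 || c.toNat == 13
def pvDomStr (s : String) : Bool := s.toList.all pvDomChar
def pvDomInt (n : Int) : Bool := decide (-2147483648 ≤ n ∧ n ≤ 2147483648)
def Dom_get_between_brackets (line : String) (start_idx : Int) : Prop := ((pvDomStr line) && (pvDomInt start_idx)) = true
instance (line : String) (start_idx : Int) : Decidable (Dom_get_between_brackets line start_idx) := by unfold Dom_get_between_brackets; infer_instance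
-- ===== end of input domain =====

-- B replaces A's char-by-char accumulate-until-')' loop with find-the-delimiter-then-slice (simpler decomposition).
-- Pre_ excludes inputs where A raises AssertionError (a '(' before the first ')' in the remainder); B raises there too.


-- ===== PORT A =====
-- A's for-loop: append each char until ')'; assert char ≠ '('.
-- On '(' Python raises AssertionError (excluded by Pre_); the port returns the accumulator there.
def gbLoopA : List Char → List Char → List Char
  | acc, [] => acc
  | acc, c :: rest =>
    if c = ')' then acc
    else if c = '(' then acc          -- assert failure: outside Pre_
    else gbLoopA (acc ++ [c]) rest

def get_between_brackets (line : String) (start_idx : Int) : String :=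
  String.ofList (gbLoopA [] (PySem.List.slice line.toList (some (start_idx + 1)) none))

-- ===== PORT B =====
-- sub = line[start_idx+1:]; end = sub.find(')'); result = sub if end == -1 else sub[:end];
-- assert '(' not in result (raises outside Pre_, where the port just returns result).
def get_between_brackets_alt (line : String) (start_idx : Int) : String :=
  let sub := PySem.List.slice line.toList (some (start_idx + 1)) none
  let e := PySem.Chars.find sub [')']
  let result := if e = -1 then sub else PySem.List.slice sub (some 0) (some e)
  String.ofList result

-- ===== PRECONDITION & SPEC =====
-- Pre_ excludes exactly the inputs on which A raises AssertionError: a '(' occurring in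
-- line[start_idx+1:] before the first ')' (B's assert raises on the same inputs).
def Pre_get_between_brackets (line : String) (start_idx : Int) : Prop :=
  '(' ∉ (PySem.List.slice line.toList (some (start_idx + 1)) none).takeWhile (· ≠ ')')
instance (line : String) (start_idx : Int) : Decidable (Pre_get_between_brackets line start_idx) := by
  unfold Pre_get_between_brackets; infer_instance
def pvWitness_get_between_brackets : String × Int := ("a(b)c", 1)

def Spec_get_between_brackets (line : String) (start_idx : Int) (out : String) : Prop := out = get_between_brackets_alt line start_idx
instance (line : String) (start_idx : Int) (out : String) : Decidable (Spec_get_between_brackets line start_idx out) := by unfold Spec_get_between_brackets; infer_instance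

-- ===== CLAIM (what is proved, stated in full; the proofs are below) =====
def Claim_equal_get_between_brackets : Prop := ∀ (line : String) (start_idx : Int), Dom_get_between_brackets line start_idx → Pre_get_between_brackets line start_idx → Spec_get_between_brackets line start_idx (get_between_brackets line start_idx)

-- ===== LEMMAS AND PROOFS =====

-- A's loop equals takeWhile (≠ ')') when no '(' occurs in that prefix.
lemma gbLoopA_eq (l acc : List Char) (h : '(' ∉ l.takeWhile (· ≠ ')')) :
    gbLoopA acc l = acc ++ l.takeWhile (· ≠ ')') := by
  induction l generalizing acc with
  | nil => simp [gbLoopA]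
  | cons c rest ih =>
    by_cases hc : c = ')'
    · simp [gbLoopA, hc]
    · have hstep : List.takeWhile (fun x => decide (x ≠ ')')) (c :: rest)
          = c :: List.takeWhile (fun x => decide (x ≠ ')')) rest :=
        List.takeWhile_cons_of_pos (by simp [hc])
      rw [hstep] at h ⊢
      have hco : c ≠ '(' := by intro he; exact h (he ▸ List.mem_cons_self)
      have h' : '(' ∉ rest.takeWhile (· ≠ ')') := fun hm => h (List.mem_cons_of_mem _ hm)
      simp [gbLoopA, hc, hco, ih _ h']

-- singleton-prefix characterisation
lemma singleton_prefix_iff (a : Char) (l : List Char) (k : Nat) :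
    [a] <+: l.drop k ↔ l[k]? = some a := by
  constructor
  · rintro ⟨t, ht⟩
    have : (l.drop k)[0]? = some a := by rw [← ht]; rfl
    simpa [List.getElem?_drop] using this
  · intro h
    refine ⟨(l.drop k).tail, ?_⟩
    have h0 : (l.drop k)[0]? = some a := by simpa [List.getElem?_drop] using h
    cases hd : l.drop k with
    | nil => simp [hd] at h0
    | cons x t => simp [hd] at h0 ⊢; exact h0.symm

-- take up to the first ')' equals takeWhile (≠ ')')
lemma take_eq_takeWhile (l : List Char) (n : Nat)
    (hn : l[n]? = some ')') (hmin : ∀ i < n, l[i]? ≠ some ')') :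
    l.take n = l.takeWhile (· ≠ ')') := by
  induction l generalizing n with
  | nil => simp at hn
  | cons c rest ih =>
    cases n with
    | zero =>
      simp at hn
      simp [hn]
    | succ m =>
      have hc : c ≠ ')' := by
        have := hmin 0 (Nat.succ_pos m)
        simpa using this
      have hstep : List.takeWhile (fun x => decide (x ≠ ')')) (c :: rest)
          = c :: List.takeWhile (fun x => decide (x ≠ ')')) rest :=
        List.takeWhile_cons_of_pos (by simp [hc])
      rw [List.take_succ_cons, hstep]
      have hn' : rest[m]? = some ')' := by simpa using hn
      have hmin' : ∀ i < m, rest[i]? ≠ some ')' := by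
        intro i hi
        have := hmin (i + 1) (Nat.succ_lt_succ hi)
        simpa using this
      rw [ih m hn' hmin']

-- B's find-then-slice result equals takeWhile (≠ ')'), unconditionally.
lemma alt_eq_takeWhile (sub : List Char) :
    (if PySem.Chars.find sub [')'] = -1 then sub
     else PySem.List.slice sub (some 0) (some (PySem.Chars.find sub [')']))) =
    sub.takeWhile (· ≠ ')') := by
  by_cases he : PySem.Chars.find sub [')'] = -1
  · rw [if_pos he]
    have hni : ¬ [')'] <:+: sub := (PySem.Chars.find_eq_neg_one_iff sub [')']).mp he
    have hnm : ')' ∉ sub := by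
      intro hm
      obtain ⟨s, t, hst⟩ := List.mem_iff_append.mp hm
      exact hni ⟨s, t, by simpa using hst.symm⟩
    symm
    rw [List.takeWhile_eq_self_iff]
    intro x hx
    simp only [decide_eq_true_eq]
    intro hxe; exact hnm (hxe ▸ hx)
  · rw [if_neg he]
    have hpos : 0 ≤ PySem.Chars.find sub [')'] := by
      have := PySem.Chars.neg_one_le_find sub [')']
      omega
    obtain ⟨hpre, hmin⟩ := PySem.Chars.find_spec (s := sub) (sub := [')']) hpos
    set n := (PySem.Chars.find sub [')']).toNat with hn
    have hslice : PySem.List.slice sub (some 0) (some (PySem.Chars.find sub [')'])) = sub.take n := by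
      rw [PySem.List.slice_zero_start, PySem.List.slice_to sub hpos]
    rw [hslice]
    apply take_eq_takeWhile
    · exact (singleton_prefix_iff ')' sub n).mp hpre
    · intro i hi hgi
      exact hmin i hi ((singleton_prefix_iff ')' sub i).mpr hgi)

-- ===== VERDICT (by name: the statement is the Claim_ definition above) =====
theorem get_between_brackets_spec : Claim_equal_get_between_brackets := by
  intro line start_idx _ hpre
  unfold Spec_get_between_brackets get_between_brackets get_between_brackets_alt
  dsimp only
  rw [gbLoopA_eq _ _ hpre, alt_eq_takeWhile]
  simp
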